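-- pv_equiv track=rewrite | github.com/bi32/algorithm | string_algorithms/advanced_string.py | lyndon_factorization
-- ===== SOURCE A (Python) =====
-- def lyndon_factorization(s):
--     """
--     Lyndon分解
--     将字符串分解为Lyndon词的非递增序列
--     时间复杂度：O(n)
--     """
--     n = len(s)
--     k = 0
--     factorization = []
--
--     while k < n:
--         i = k
--         j = k + 1
--
--         while j < n and s[i] <= s[j]:
--             if s[i] < s[j]:
--                 i = k
--             else:
--                 i += 1
--             j += 1
--
--         while k <= i:
--             factorization.append(s[k:k + j - i])
--             k += j - i
--
--     return factorization
-- ===== SOURCE B (Python) =====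
-- def lyndon_factorization(s):
--     """Greedy textbook alternative: repeatedly cut off the longest prefix
--     that is a Lyndon word (strictly smaller than all its proper suffixes)."""
--     def is_lyndon(t):
--         return len(t) > 0 and all(t < t[r:] for r in range(1, len(t)))
--
--     n = len(s)
--     factors = []
--     k = 0
--     while k < n:
--         m = n
--         while not is_lyndon(s[k:m]):
--             m -= 1
--         factors.append(s[k:m])
--         k = m
--     return factors
-- ===== Notes on version B (the rewrite author's own statement) =====
-- stated objective: alternative
-- what changed: Replaces Duval's amortized two-pointer extension with a greedy loop that repeatedly cuts off the longest prefix that passes a direct brute-force Lyndon-word test (strictly smaller than every proper suffix).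
import Mathlib
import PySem

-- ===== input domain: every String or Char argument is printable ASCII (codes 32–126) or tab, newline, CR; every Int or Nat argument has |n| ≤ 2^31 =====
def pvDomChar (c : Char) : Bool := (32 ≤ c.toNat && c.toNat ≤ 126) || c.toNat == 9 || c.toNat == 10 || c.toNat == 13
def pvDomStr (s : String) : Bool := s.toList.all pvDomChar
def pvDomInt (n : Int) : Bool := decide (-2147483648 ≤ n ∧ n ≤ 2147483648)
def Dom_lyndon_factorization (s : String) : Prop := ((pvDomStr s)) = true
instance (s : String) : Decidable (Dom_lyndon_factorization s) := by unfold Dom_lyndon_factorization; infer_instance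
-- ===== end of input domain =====

-- B re-implements Duval's amortized two-pointer factorization as a greedy loop that repeatedly
-- cuts off the longest prefix passing a direct brute-force Lyndon-word test; equal return values.

-- ===== PORT A =====
-- Every loop below is ported with a structural fuel counter (initial fuel is always sufficient,
-- so the 0-branch is never the reason a value is returned: a pure totality guard).
-- A's inner while loop: `while j < n and s[i] <= s[j]: (i,j) <- (k, j+1) or (i+1, j+1)`.
def pvInnerA (t : List Char) (k : Nat) : Nat → Nat → Nat → Nat × Nat
  | 0, i, j => (i, j)
  | fuel + 1, i, j =>
    if j < t.length ∧ t.getD i ' ' ≤ t.getD j ' ' then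
      if t.getD i ' ' < t.getD j ' ' then pvInnerA t k fuel k (j + 1)
      else pvInnerA t k fuel (i + 1) (j + 1)
    else (i, j)

-- A's append loop: `while k <= i: factorization.append(s[k:k+j-i]); k += j-i` (p = j - i is constant).
def pvMidA (t : List Char) (i p : Nat) : Nat → Nat → List (List Char) × Nat
  | 0, k => ([], k)
  | fuel + 1, k =>
    if k ≤ i then
      ((t.drop k).take p :: (pvMidA t i p fuel (k + p)).1, (pvMidA t i p fuel (k + p)).2)
    else ([], k)

-- A's outer while loop.
def pvOuterA (t : List Char) : Nat → Nat → List (List Char)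
  | 0, _ => []
  | fuel + 1, k =>
    if k < t.length then
      (pvMidA t (pvInnerA t k (t.length - (k + 1)) k (k + 1)).1
          ((pvInnerA t k (t.length - (k + 1)) k (k + 1)).2 -
            (pvInnerA t k (t.length - (k + 1)) k (k + 1)).1)
          ((pvInnerA t k (t.length - (k + 1)) k (k + 1)).1 + 1 - k) k).1 ++
        pvOuterA t fuel
          (pvMidA t (pvInnerA t k (t.length - (k + 1)) k (k + 1)).1
            ((pvInnerA t k (t.length - (k + 1)) k (k + 1)).2 -
              (pvInnerA t k (t.length - (k + 1)) k (k + 1)).1)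
            ((pvInnerA t k (t.length - (k + 1)) k (k + 1)).1 + 1 - k) k).2
    else []

def lyndon_factorization (s : String) : List String :=
  (pvOuterA s.toList s.toList.length 0).map String.ofList

-- ===== PORT B =====
-- B's helper: is_lyndon(t) = len(t) > 0 and all(t < t[r:] for r in range(1, len(t))).
def pvIsLyndonB (u : List Char) : Bool :=
  decide (0 < u.length) &&
    (PySem.List.pyRange 1 (PySem.List.len u) 1).all
      (fun r => PySem.Chars.strLt u (PySem.List.slice u (some r) none))

-- B's inner search: `m = n; while not is_lyndon(s[k:m]): m -= 1` (m is its own fuel).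
def pvFindB (t : List Char) (k : Nat) : Nat → Nat
  | 0 => 0
  | m + 1 => if pvIsLyndonB ((t.drop k).take (m + 1 - k)) then m + 1 else pvFindB t k m

-- B's outer loop: cut the longest Lyndon prefix, repeat (fuel as above).
def pvOuterB (t : List Char) : Nat → Nat → List (List Char)
  | 0, _ => []
  | fuel + 1, k =>
    if k < t.length then
      (t.drop k).take (pvFindB t k t.length - k) :: pvOuterB t fuel (pvFindB t k t.length)
    else []

def lyndon_factorization_alt (s : String) : List String :=
  (pvOuterB s.toList s.toList.length 0).map String.ofList

-- ===== PRECONDITION & SPEC =====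
def Spec_lyndon_factorization (s : String) (out : List String) : Prop := out = lyndon_factorization_alt s
instance (s : String) (out : List String) : Decidable (Spec_lyndon_factorization s out) := by unfold Spec_lyndon_factorization; infer_instance

-- ===== CLAIM (what is proved, stated in full; the proofs are below) =====
def Claim_equal_lyndon_factorization : Prop := ∀ (s : String), Dom_lyndon_factorization s → Spec_lyndon_factorization s (lyndon_factorization s)

-- ===== LEMMAS AND PROOFS =====

-- ---- lexicographic order on List Char (the order behind Python string `<`) ----

theorem pvLex_asymm (a b : List Char) (h1 : a < b) (h2 : b < a) : False := by
  induction a generalizing b with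
  | nil => cases h2
  | cons x xs ih =>
    cases b with
    | nil => cases h1
    | cons y ys =>
      have h1' : List.Lex (· < ·) (x :: xs) (y :: ys) := h1
      have h2' : List.Lex (· < ·) (y :: ys) (x :: xs) := h2
      rw [List.cons_lex_cons_iff] at h1' h2'
      rcases h1' with hlt | ⟨rfl, htl⟩
      · rcases h2' with hlt2 | ⟨rfl, _⟩
        · exact absurd hlt2 (lt_asymm hlt)
        · exact lt_irrefl _ hlt
      · rcases h2' with hlt2 | ⟨_, htl2⟩
        · exact lt_irrefl _ hlt2
        · exact ih ys htl htl2

theorem pvLex_mismatch (a b : List Char) (d : Nat) (ha : d < a.length) (hb : d < b.length)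
    (hag : ∀ x, x < d → a.getD x ' ' = b.getD x ' ') (hlt : a.getD d ' ' < b.getD d ' ') :
    a < b := by
  induction d generalizing a b with
  | zero =>
    cases a with
    | nil => simp at ha
    | cons x xs =>
      cases b with
      | nil => simp at hb
      | cons y ys =>
        simp only [List.getD_cons_zero] at hlt
        exact List.Lex.rel hlt
  | succ d ih =>
    cases a with
    | nil => simp at ha
    | cons x xs =>
      cases b with
      | nil => simp at hb
      | cons y ys =>
        have hxy : x = y := by
          have := hag 0 (by omega)
          simpa using this
        subst hxy
        refine List.Lex.cons (ih xs ys (by simpa using ha) (by simpa using hb) ?_ (by simpa using hlt))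
        intro z hz
        have := hag (z + 1) (by omega)
        simpa using this

theorem pvLex_prefix (a b : List Char) (hlen : a.length < b.length)
    (hag : ∀ x, x < a.length → a.getD x ' ' = b.getD x ' ') : a < b := by
  induction a generalizing b with
  | nil =>
    cases b with
    | nil => simp at hlen
    | cons y ys => exact List.Lex.nil
  | cons x xs ih =>
    cases b with
    | nil => simp at hlen
    | cons y ys =>
      have hxy : x = y := by have := hag 0 (by simp); simpa using this
      subst hxy
      refine List.Lex.cons (ih ys (by simpa using hlen) ?_)
      intro z hz
      have := hag (z + 1) (by simpa using Nat.succ_lt_succ hz)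
      simpa using this

theorem pvLex_elim (a b : List Char) (h : a < b) :
    (∃ d, d < a.length ∧ d < b.length ∧ (∀ x, x < d → a.getD x ' ' = b.getD x ' ') ∧
      a.getD d ' ' < b.getD d ' ') ∨
    (a.length < b.length ∧ ∀ x, x < a.length → a.getD x ' ' = b.getD x ' ') := by
  induction a generalizing b with
  | nil =>
    cases b with
    | nil => cases h
    | cons y ys => right; exact ⟨by simp, by intro x hx; simp at hx⟩
  | cons x xs ih =>
    cases b with
    | nil => cases h
    | cons y ys =>
      have h' : List.Lex (· < ·) (x :: xs) (y :: ys) := h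
      rw [List.cons_lex_cons_iff] at h'
      rcases h' with hlt | ⟨rfl, htl⟩
      · left
        exact ⟨0, by simp, by simp, by intro z hz; omega, by simpa using hlt⟩
      · rcases ih ys htl with ⟨d, h1, h2, h3, h4⟩ | ⟨h1, h2⟩
        · left
          refine ⟨d + 1, by simpa using h1, by simpa using h2, ?_, by simpa using h4⟩
          intro z hz
          cases z with
          | zero => simp
          | succ z => simpa using h3 z (by omega)
        · right
          refine ⟨by simpa using h1, ?_⟩
          intro z hz
          cases z with
          | zero => simp
          | succ z => simpa using h2 z (by simpa using hz)

-- ---- indexing utilities ----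

theorem pvGetD_drop (t : List Char) (a x : Nat) :
    (t.drop a).getD x ' ' = t.getD (a + x) ' ' := by
  simp [List.getD_eq_getElem?_getD, List.getElem?_drop]

theorem pvGetD_take (t : List Char) (b x : Nat) (h : x < b) :
    (t.take b).getD x ' ' = t.getD x ' ' := by
  simp [List.getD_eq_getElem?_getD, h]

theorem pvSeg_getD (t : List Char) (a b x : Nat) (h : x < b) :
    ((t.drop a).take b).getD x ' ' = t.getD (a + x) ' ' := by
  rw [pvGetD_take _ _ _ h, pvGetD_drop]

theorem pvSeg_len (t : List Char) (a b : Nat) (h : a + b ≤ t.length) :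
    ((t.drop a).take b).length = b := by
  simp [List.length_take, List.length_drop]
  omega

-- ---- the Lyndon property: strictly smaller than every proper suffix ----

def pvLy (u : List Char) : Prop := ∀ r, 0 < r → r < u.length → u < u.drop r

theorem pvIsLyndonB_iff (u : List Char) :
    pvIsLyndonB u = true ↔ 0 < u.length ∧ pvLy u := by
  unfold pvIsLyndonB
  simp only [Bool.and_eq_true, decide_eq_true_iff, List.all_eq_true]
  constructor
  · rintro ⟨h1, h2⟩
    refine ⟨h1, ?_⟩
    intro r hr0 hrlen
    have hmem : (r : Int) ∈ PySem.List.pyRange 1 (PySem.List.len u) 1 := by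
      rw [PySem.List.mem_pyRange_one]
      simp [PySem.List.len_eq]
      omega
    have := h2 _ hmem
    rw [PySem.List.slice_from_natCast] at this
    simpa [PySem.Chars.strLt] using this
  · rintro ⟨h1, h2⟩
    refine ⟨h1, ?_⟩
    intro r hmem
    rw [PySem.List.mem_pyRange_one] at hmem
    simp [PySem.List.len_eq] at hmem
    obtain ⟨hr1, hr2⟩ := hmem
    have hr0 : r = ((r.toNat : Nat) : Int) := by omega
    rw [hr0, PySem.List.slice_from_natCast]
    simpa [PySem.Chars.strLt] using h2 r.toNat (by omega) (by omega)

-- ---- periodicity helpers ----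

theorem pvUmod (u : List Char) (p jj : Nat) (hp : 0 < p)
    (hper : ∀ x, p ≤ x → x < jj → u.getD x ' ' = u.getD (x - p) ' ') :
    ∀ x, x < jj → u.getD x ' ' = u.getD (x % p) ' ' := by
  intro x
  induction x using Nat.strong_induction_on with
  | _ x ih =>
    intro hx
    by_cases hxp : x < p
    · rw [Nat.mod_eq_of_lt hxp]
    · rw [hper x (by omega) hx, Nat.mod_eq_sub_mod (by omega)]
      exact ih (x - p) (by omega) (by omega)

theorem pvNoPeriod (u : List Char) (p : Nat) (hL : pvLy u) (hp : 0 < p) (hlt : p < u.length)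
    (hper : ∀ x, p ≤ x → x < u.length → u.getD x ' ' = u.getD (x - p) ' ') : False := by
  have h1 : u < u.drop p := hL p hp hlt
  have h2 : u.drop p < u := by
    apply pvLex_prefix
    · simp; omega
    · intro x hx
      simp only [List.length_drop] at hx
      rw [pvGetD_drop]
      rw [hper (p + x) (by omega) (by omega)]
      congr 1
      omega
  exact pvLex_asymm _ _ h1 h2

-- ---- extension: a periodic prefix of a Lyndon word followed by a bigger character is Lyndon ----

theorem pvLyExt (u : List Char) (p : Nat) (hp : 0 < p) (hlen : 0 < u.length)
    (hpj : p ≤ u.length - 1)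
    (hper : ∀ x, p ≤ x → x < u.length - 1 → u.getD x ' ' = u.getD (x - p) ' ')
    (hLp : pvLy (u.take p))
    (hgt : u.getD (u.length - 1 - p) ' ' < u.getD (u.length - 1) ' ') : pvLy u := by
  set jj := u.length - 1 with hjj
  have umod := pvUmod u p jj hp hper
  intro r hr0 hrn
  have hrjj : r ≤ jj := by omega
  have hrdm : p * (r / p) + r % p = r := Nat.div_add_mod r p
  by_cases hb : r % p = 0
  · -- r is a multiple of the period
    apply pvLex_mismatch u (u.drop r) (jj - r) (by omega) (by simp; omega)
    · intro x hx
      rw [pvGetD_drop, umod x (by omega), umod (r + x) (by omega)]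
      congr 1
      rw [show r + x = p * (r / p) + x by omega, Nat.mul_add_mod]
    · rw [pvGetD_drop, show r + (jj - r) = jj by omega]
      have e1 : u.getD (jj - p) ' ' = u.getD ((jj - p) % p) ' ' := umod (jj - p) (by omega)
      have e2 : (jj - p) % p = jj % p := (Nat.mod_eq_sub_mod hpj).symm
      have e3 : u.getD (jj - r) ' ' = u.getD ((jj - r) % p) ' ' := umod (jj - r) (by omega)
      have e4 : (jj - r) % p = jj % p := by
        rw [show jj - r = jj - p * (r / p) by omega]
        conv_rhs => rw [show jj = (jj - p * (r / p)) + p * (r / p) by omega]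
        rw [Nat.add_mul_mod_self_left]
      rw [e3, e4, ← e2, ← e1]
      exact hgt
  · -- r is not a multiple: use the Lyndon property of the period word
    have hbp : r % p < p := Nat.mod_lt _ hp
    have hwlen : (u.take p).length = p := by simp; omega
    have hww : u.take p < (u.take p).drop (r % p) := by
      apply hLp (r % p) (by omega)
      omega
    rcases pvLex_elim _ _ hww with ⟨d, hd1, hd2, hd3, hd4⟩ | ⟨hl, -⟩
    · rw [hwlen] at hd1
      rw [List.length_drop, hwlen] at hd2
      have hagw : ∀ x, x < d → u.getD x ' ' = u.getD (r % p + x) ' ' := by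
        intro x hx
        have := hd3 x hx
        rwa [pvGetD_take _ _ _ (by omega), pvGetD_drop, pvGetD_take _ _ _ (by omega)] at this
      have hdw : u.getD d ' ' < u.getD (r % p + d) ' ' := by
        have := hd4
        rwa [pvGetD_take _ _ _ (by omega), pvGetD_drop, pvGetD_take _ _ _ (by omega)] at this
      set d' := min d (jj - r) with hd'
      apply pvLex_mismatch u (u.drop r) d' (by omega) (by simp; omega)
      · intro x hx
        rw [pvGetD_drop, umod (r + x) (by omega)]
        rw [show (r + x) % p = r % p + x by
          rw [show r + x = p * (r / p) + (r % p + x) by omega, Nat.mul_add_mod,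
            Nat.mod_eq_of_lt (by omega)]]
        exact hagw x (by omega)
      · by_cases hc : d < jj - r
        · rw [pvGetD_drop, umod (r + d') (by omega)]
          rw [show (r + d') % p = r % p + d by
            rw [show d' = d by omega, show r + d = p * (r / p) + (r % p + d) by omega,
              Nat.mul_add_mod, Nat.mod_eq_of_lt (by omega)]]
          rw [show d' = d by omega]
          exact hdw
        · -- the suffix runs into the final (larger) character
          rw [pvGetD_drop, show r + d' = jj by omega]
          have hjmod : jj % p = r % p + d' := by
            rw [show jj = p * (r / p) + (r % p + d') by omega, Nat.mul_add_mod,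
              Nat.mod_eq_of_lt (by omega)]
          have e1 : u.getD (jj - p) ' ' = u.getD (jj % p) ' ' := by
            rw [umod (jj - p) (by omega), (Nat.mod_eq_sub_mod hpj).symm]
          have hle : u.getD d' ' ' ≤ u.getD (r % p + d') ' ' := by
            rcases Nat.lt_or_ge d' d with h | h
            · exact le_of_eq (hagw d' h)
            · rw [show d' = d by omega]
              exact le_of_lt hdw
          calc u.getD d' ' ' ≤ u.getD (r % p + d') ' ' := hle
            _ = u.getD (jj % p) ' ' := by rw [hjmod]
            _ = u.getD (jj - p) ' ' := e1.symm
            _ < u.getD jj ' ' := hgt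
    · rw [List.length_drop, hwlen] at hl
      omega

-- ---- maximality: past the exit position no longer prefix is Lyndon ----

theorem pvLyMax (u : List Char) (p jj : Nat) (hp : 0 < p) (hpj : p ≤ jj) (hjj : jj < u.length)
    (hper : ∀ x, p ≤ x → x < jj → u.getD x ' ' = u.getD (x - p) ' ')
    (hgt : u.getD jj ' ' < u.getD (jj - p) ' ') : ¬ pvLy u := by
  intro hL
  have umod := pvUmod u p jj hp hper
  have hdm : p * (jj / p) + jj % p = jj := Nat.div_add_mod jj p
  have hdiv1 : 1 ≤ jj / p := (Nat.one_le_div_iff hp).mpr hpj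
  have hmodlt : jj % p < p := Nat.mod_lt _ hp
  set r := p * (jj / p) with hr
  have hr1 : p ≤ r := by calc p = p * 1 := by omega
                               _ ≤ p * (jj / p) := Nat.mul_le_mul_left p hdiv1
  have hr2 : r ≤ jj := by omega
  set d := jj - r with hd
  have h1 : u < u.drop r := hL r (by omega) (by omega)
  have h2 : u.drop r < u := by
    apply pvLex_mismatch (u.drop r) u d (by simp; omega) (by omega)
    · intro x hx
      rw [pvGetD_drop, umod (r + x) (by omega), umod x (by omega)]
      congr 1
      rw [hr, Nat.mul_add_mod]
    · rw [pvGetD_drop, show r + d = jj by omega]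
      have e1 : u.getD (jj - p) ' ' = u.getD ((jj - p) % p) ' ' := umod (jj - p) (by omega)
      have e2 : (jj - p) % p = jj % p := (Nat.mod_eq_sub_mod hpj).symm
      have e3 : d = jj % p := by omega
      rw [e1, e2, ← e3] at hgt
      exact hgt
  exact pvLex_asymm _ _ h1 h2

-- ---- the invariant of A's inner loop ----

def pvInv (t : List Char) (k i j : Nat) : Prop :=
  k ≤ i ∧ i < j ∧ j ≤ t.length ∧
  (∀ x, k + (j - i) ≤ x → x < j → t.getD x ' ' = t.getD (x - (j - i)) ' ') ∧
  pvLy ((t.drop k).take (j - i))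

theorem pvInnerA_spec (t : List Char) (k fuel i j : Nat) (hfj : t.length ≤ j + fuel)
    (hInv : pvInv t k i j) :
    pvInv t k (pvInnerA t k fuel i j).1 (pvInnerA t k fuel i j).2 ∧
      ((pvInnerA t k fuel i j).2 = t.length ∨
        t.getD (pvInnerA t k fuel i j).2 ' ' < t.getD (pvInnerA t k fuel i j).1 ' ') := by
  induction fuel generalizing i j with
  | zero =>
    obtain ⟨h1, h2, h3, h4, h5⟩ := hInv
    rw [pvInnerA]
    exact ⟨⟨h1, h2, h3, h4, h5⟩, Or.inl (by omega)⟩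
  | succ fuel ih =>
    obtain ⟨h1, h2, h3, h4, h5⟩ := hInv
    rw [pvInnerA]
    split
    case isTrue h =>
      split
      case isTrue hlt =>
        refine ih k (j + 1) (by omega) ⟨le_refl k, by omega, by omega, ?_, ?_⟩
        · intro x hx1 hx2
          exact absurd hx2 (by omega)
        · -- extension case: s[i] < s[j] makes s[k:j+1] a Lyndon word
          have hul : ((t.drop k).take (j + 1 - k)).length = j + 1 - k :=
            pvSeg_len t k (j + 1 - k) (by omega)
          apply pvLyExt _ (j - i) (by omega) (by omega) (by omega)
          · intro x hx1 hx2
            rw [hul] at hx2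
            rw [pvSeg_getD t k _ x (by omega), pvSeg_getD t k _ (x - (j - i)) (by omega)]
            rw [h4 (k + x) (by omega) (by omega)]
            congr 1
            omega
          · rw [List.take_take, show min (j - i) (j + 1 - k) = j - i by omega]
            exact h5
          · rw [hul, pvSeg_getD t k _ (j + 1 - k - 1 - (j - i)) (by omega),
              pvSeg_getD t k _ (j + 1 - k - 1) (by omega),
              show k + (j + 1 - k - 1 - (j - i)) = i by omega,
              show k + (j + 1 - k - 1) = j by omega]
            exact hlt
      case isFalse hnlt =>
        have heq : t.getD i ' ' = t.getD j ' ' := le_antisymm h.2 (not_lt.mp hnlt)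
        refine ih (i + 1) (j + 1) (by omega) ⟨by omega, by omega, by omega, ?_, ?_⟩
        · intro x hx1 hx2
          rcases Nat.lt_or_ge x j with hxj | hxj
          · rw [h4 x (by omega) hxj]
            congr 1
            omega
          · have hxj' : x = j := by omega
            subst hxj'
            rw [show x - (x + 1 - (i + 1)) = i by omega]
            exact heq.symm
        · rw [show j + 1 - (i + 1) = j - i by omega]
          exact h5
    case isFalse h =>
      refine ⟨⟨h1, h2, h3, h4, h5⟩, ?_⟩
      rcases Nat.lt_or_ge j t.length with hj | hj
      · right
        have : ¬ t.getD i ' ' ≤ t.getD j ' ' := fun hle => h ⟨hj, hle⟩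
        exact not_le.mp this
      · left
        show j = t.length
        omega

-- ---- iterated periodicity on the whole string ----

theorem pvTmod (t : List Char) (k p j : Nat) (hp : 0 < p)
    (hper : ∀ x, k + p ≤ x → x < j → t.getD x ' ' = t.getD (x - p) ' ') :
    ∀ x, k ≤ x → x < j → t.getD x ' ' = t.getD (k + (x - k) % p) ' ' := by
  intro x
  induction x using Nat.strong_induction_on with
  | _ x ih =>
    intro hx1 hx2
    by_cases hxp : x < k + p
    · rw [Nat.mod_eq_of_lt (by omega), show k + (x - k) = x by omega]
    · rw [hper x (by omega) hx2, ih (x - p) (by omega) (by omega) (by omega)]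
      have hmm : (x - k) % p = (x - p - k) % p := by
        rw [show x - k = (x - p - k) + p by omega, Nat.add_mod_right]
      rw [hmm]

theorem pvSegShift (t : List Char) (k p j a : Nat) (hp : 0 < p) (hka : k ≤ a)
    (hmod : (a - k) % p = 0) (haj : a + p ≤ j) (hjn : j ≤ t.length)
    (hper : ∀ x, k + p ≤ x → x < j → t.getD x ' ' = t.getD (x - p) ' ') :
    (t.drop a).take p = (t.drop k).take p := by
  have tmod := pvTmod t k p j hp hper
  have hla : ((t.drop a).take p).length = p := pvSeg_len t a p (by omega)
  have hlk : ((t.drop k).take p).length = p := pvSeg_len t k p (by omega)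
  apply List.ext_getElem (by omega)
  intro n hn1 hn2
  rw [← List.getD_eq_getElem _ ' ', ← List.getD_eq_getElem _ ' ']
  rw [pvSeg_getD t a p n (by omega), pvSeg_getD t k p n (by omega)]
  rw [tmod (a + n) (by omega) (by omega), tmod (k + n) (by omega) (by omega)]
  congr 1
  rw [show a + n - k = n + (a - k) by omega, show k + n - k = n by omega]
  obtain ⟨c, hc⟩ := Nat.dvd_of_mod_eq_zero hmod
  rw [hc, Nat.add_mul_mod_self_left]

-- ---- characterization of B's downward search ----

theorem pvFindB_eq (t : List Char) (a tgt : Nat) (htgt : 0 < tgt)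
    (hT : pvIsLyndonB ((t.drop a).take (tgt - a)) = true) :
    ∀ m, tgt ≤ m → (∀ q, tgt < q → q ≤ m → pvIsLyndonB ((t.drop a).take (q - a)) = false) →
      pvFindB t a m = tgt := by
  intro m
  induction m with
  | zero => omega
  | succ m ih =>
    intro hm hmax
    rcases Nat.lt_or_ge tgt (m + 1) with hcase | hcase
    · rw [pvFindB, if_neg (by simp [hmax (m + 1) hcase (le_refl _)])]
      exact ih (by omega) (fun q hq1 hq2 => hmax q hq1 (by omega))
    · have : tgt = m + 1 := by omega
      subst this
      rw [pvFindB, if_pos hT]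

-- ---- the factor found by B at each aligned position is exactly A's period ----

theorem pvFactorStep (t : List Char) (k i' j' : Nat) (hInv : pvInv t k i' j')
    (hexit : j' = t.length ∨ t.getD j' ' ' < t.getD i' ' ')
    (a : Nat) (ha1 : k ≤ a) (ha2 : (a - k) % (j' - i') = 0) (ha3 : a + (j' - i') ≤ j') :
    pvFindB t a t.length = a + (j' - i') := by
  obtain ⟨h1, h2, h3, h4, h5⟩ := hInv
  set p := j' - i' with hpdef
  have hp : 0 < p := by omega
  apply pvFindB_eq t a (a + p) (by omega) ?_ t.length (by omega) ?_
  · -- the prefix of length p is Lyndon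
    rw [show a + p - a = p by omega]
    rw [pvSegShift t k p j' a hp ha1 ha2 ha3 h3 h4]
    rw [pvIsLyndonB_iff]
    constructor
    · rw [pvSeg_len t k p (by omega)]; omega
    · exact h5
  · -- no longer prefix is Lyndon
    intro q hq1 hq2
    rw [Bool.eq_false_iff]
    intro htrue
    rw [pvIsLyndonB_iff] at htrue
    obtain ⟨hq0, hLyq⟩ := htrue
    have hlu : ((t.drop a).take (q - a)).length = q - a := pvSeg_len t a (q - a) (by omega)
    rcases Nat.lt_or_ge j' q with hqj1 | hqj2
    · -- beyond the exit: the exit character kills it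
      have hj'n : j' < t.length := by omega
      have hgt : t.getD j' ' ' < t.getD i' ' ' := by rcases hexit with h | h; omega; exact h
      apply pvLyMax _ p (j' - a) hp (by omega) (by omega) ?_ ?_ hLyq
      · intro x hx1 hx2
        rw [pvSeg_getD t a _ x (by omega), pvSeg_getD t a _ (x - p) (by omega)]
        rw [h4 (a + x) (by omega) (by omega)]
        congr 1
        omega
      · rw [pvSeg_getD t a _ (j' - a) (by omega), pvSeg_getD t a _ (j' - a - p) (by omega),
          show a + (j' - a) = j' by omega, show a + (j' - a - p) = i' by omega]
        exact hgt

    · -- within the scanned periodic region: a longer Lyndon prefix would have a period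
      apply pvNoPeriod _ p hLyq hp (by omega)
      intro x hx1 hx2
      rw [hlu] at hx2
      rw [pvSeg_getD t a _ x (by omega), pvSeg_getD t a _ (x - p) (by omega)]
      rw [h4 (a + x) (by omega) (by omega)]
      congr 1
      omega
-- ---- small facts about the fueled loops ----

theorem pvIsLyndonB_singleton (c : Char) : pvIsLyndonB [c] = true := by
  simp [pvIsLyndonB]

theorem pvFindB_ge (t : List Char) (k : Nat) (hk : k < t.length) :
    ∀ m, k + 1 ≤ m → k + 1 ≤ pvFindB t k m := by
  intro m
  induction m with
  | zero => omega
  | succ m ih =>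
    intro hm
    rw [pvFindB]
    split
    · omega
    · next hfalse =>
      by_cases hmk : m = k
      · exfalso
        apply hfalse
        have hdrop : t.drop k = t[k] :: t.drop (k + 1) := List.drop_eq_getElem_cons hk
        have : (t.drop k).take (m + 1 - k) = [t[k]] := by
          subst hmk
          rw [hdrop, show m + 1 - m = 1 by omega]
          rfl
        rw [this]
        exact pvIsLyndonB_singleton _
      · exact ih (by omega)

theorem pvMidA_snd_ge (t : List Char) (i p : Nat) :
    ∀ fuel k, k ≤ (pvMidA t i p fuel k).2 := by
  intro fuel
  induction fuel with
  | zero => intro k; rw [pvMidA]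
  | succ fuel ih =>
    intro k
    rw [pvMidA]
    split
    · exact le_trans (by omega) (ih (k + p))
    · exact le_refl k

theorem pvOuterB_congr (t : List Char) :
    ∀ f g k, t.length ≤ k + f → t.length ≤ k + g → pvOuterB t f k = pvOuterB t g k := by
  intro f
  induction f with
  | zero =>
    intro g k hf hg
    cases g with
    | zero => rfl
    | succ g => rw [pvOuterB, pvOuterB, if_neg (by omega)]
  | succ f ih =>
    intro g k hf hg
    cases g with
    | zero => rw [pvOuterB, pvOuterB]; rw [if_neg (by omega)]
    | succ g =>
      rw [pvOuterB]
      conv_rhs => rw [pvOuterB]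
      by_cases hk : k < t.length
      · rw [if_pos hk, if_pos hk]
        have hF := pvFindB_ge t k hk t.length (by omega)
        rw [ih g (pvFindB t k t.length) (by omega) (by omega)]
      · rw [if_neg hk, if_neg hk]

-- ---- unrolling A's append loop against B's outer loop ----

theorem pvMidA_spec (t : List Char) (k i' j' : Nat) (hp : 0 < j' - i') (hInv : pvInv t k i' j')
    (hexit : j' = t.length ∨ t.getD j' ' ' < t.getD i' ' ') :
    ∀ fuel a, k ≤ a → (a - k) % (j' - i') = 0 → i' + 1 - a ≤ fuel →
      (pvMidA t i' (j' - i') fuel a).1 ++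
          pvOuterB t (t.length - (pvMidA t i' (j' - i') fuel a).2)
            (pvMidA t i' (j' - i') fuel a).2 =
        pvOuterB t (t.length - a) a := by
  obtain ⟨h1, h2, h3, h4, h5⟩ := hInv
  intro fuel
  induction fuel with
  | zero =>
    intro a ha1 ha2 hfa
    rw [pvMidA]
    rfl
  | succ fuel ih =>
    intro a ha1 ha2 hfa
    rw [pvMidA]
    split
    case isTrue hai =>
      simp only [List.cons_append]
      have hstep : pvFindB t a t.length = a + (j' - i') :=
        pvFactorStep t k i' j' ⟨h1, h2, h3, h4, h5⟩ hexit a ha1 ha2 (by omega)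
      have hlen : a < t.length := by omega
      conv_rhs => rw [show t.length - a = (t.length - a - 1) + 1 by omega, pvOuterB,
        if_pos hlen]
      rw [hstep, show a + (j' - i') - a = j' - i' by omega]
      congr 1
      rw [ih (a + (j' - i')) (by omega)
        (by rw [show a + (j' - i') - k = (a - k) + (j' - i') by omega, Nat.add_mod, ha2]
            simp [Nat.mod_self])
        (by omega)]
      exact pvOuterB_congr t _ _ _ (by omega) (by omega)
    case isFalse hai =>
      rfl

-- ---- the main equivalence ----

theorem pv_main (t : List Char) :
    ∀ fuel k, t.length ≤ k + fuel → pvOuterA t fuel k = pvOuterB t fuel k := by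
  intro fuel
  induction fuel with
  | zero => intro k hf; rfl
  | succ fuel ih =>
    intro k hf
    rw [pvOuterA]
    by_cases hk : k < t.length
    · rw [if_pos hk]
      have hInv0 : pvInv t k k (k + 1) := by
        refine ⟨le_refl k, by omega, by omega, ?_, ?_⟩
        · intro x hx1 hx2
          exact absurd hx2 (by omega)
        · intro r hr0 hrlen
          have : ((t.drop k).take (k + 1 - k)).length ≤ k + 1 - k := List.length_take_le _ _
          omega
      obtain ⟨hInv', hexit⟩ := pvInnerA_spec t k (t.length - (k + 1)) k (k + 1) (by omega) hInv0
      obtain ⟨h1, h2, h3, h4, h5⟩ := hInv'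
      have hmid := pvMidA_spec t k (pvInnerA t k (t.length - (k + 1)) k (k + 1)).1
        (pvInnerA t k (t.length - (k + 1)) k (k + 1)).2 (by omega) ⟨h1, h2, h3, h4, h5⟩ hexit
        ((pvInnerA t k (t.length - (k + 1)) k (k + 1)).1 + 1 - k) k (le_refl k) (by simp)
        (le_refl _)
      have hge : k + ((pvInnerA t k (t.length - (k + 1)) k (k + 1)).2 -
          (pvInnerA t k (t.length - (k + 1)) k (k + 1)).1) ≤
          (pvMidA t (pvInnerA t k (t.length - (k + 1)) k (k + 1)).1
            ((pvInnerA t k (t.length - (k + 1)) k (k + 1)).2 -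
              (pvInnerA t k (t.length - (k + 1)) k (k + 1)).1)
            ((pvInnerA t k (t.length - (k + 1)) k (k + 1)).1 + 1 - k) k).2 := by
        rw [show (pvInnerA t k (t.length - (k + 1)) k (k + 1)).1 + 1 - k =
          ((pvInnerA t k (t.length - (k + 1)) k (k + 1)).1 - k) + 1 by omega, pvMidA,
          if_pos (by omega)]
        exact le_trans (by omega) (pvMidA_snd_ge t _ _ _ _)
      rw [ih _ (by omega)]
      rw [pvOuterB_congr t fuel
        (t.length - (pvMidA t (pvInnerA t k (t.length - (k + 1)) k (k + 1)).1
          ((pvInnerA t k (t.length - (k + 1)) k (k + 1)).2 -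
            (pvInnerA t k (t.length - (k + 1)) k (k + 1)).1)
          ((pvInnerA t k (t.length - (k + 1)) k (k + 1)).1 + 1 - k) k).2) _ (by omega) (by omega)]
      rw [hmid]
      exact (pvOuterB_congr t (fuel + 1) (t.length - k) k (by omega) (by omega)).symm
    · rw [if_neg hk, pvOuterB, if_neg hk]

-- ===== VERDICT (by name: the statement is the Claim_ definition above) =====
theorem lyndon_factorization_spec : Claim_equal_lyndon_factorization := by
  intro s _
  unfold Spec_lyndon_factorization lyndon_factorization lyndon_factorization_alt
  rw [pv_main s.toList s.toList.length 0 (by omega)]
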